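-- pv_equiv track=rewrite | github.com/redlady888/iCONtainer | i-container-app/app.py | determine_spoilage
-- ===== SOURCE A (Python) =====
-- THRESHOLDS = {
--     'meat': {
--         'CO2': {'warning': 5000, 'spoiled': 10000},
--         'NH3': {'warning': 15, 'spoiled': 30},
--         'H2S': {'warning': 5, 'spoiled': 10},
--         'VOCs': {'warning': 1000, 'spoiled': 2000}
--     },
--     'eggs': {
--         'CO2': {'warning': 3000, 'spoiled': 7000},
--         'NH3': {'warning': 20, 'spoiled': 40},
--         'H2S': {'warning': 3, 'spoiled': 8},
--         'VOCs': {'warning': 800, 'spoiled': 1500}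
--     },
--     'dairy': {
--         'CO2': {'warning': 4000, 'spoiled': 8000},
--         'NH3': {'warning': 10, 'spoiled': 25},
--         'H2S': {'warning': 2, 'spoiled': 6},
--         'VOCs': {'warning': 900, 'spoiled': 1800}
--     },
--     'fruits': {
--         'CO2': {'warning': 2000, 'spoiled': 5000},
--         'NH3': {'warning': 5, 'spoiled': 15},
--         'H2S': {'warning': 1, 'spoiled': 4},
--         'VOCs': {'warning': 700, 'spoiled': 1400}
--     },
--     'vegetables': {
--         'CO2': {'warning': 2500, 'spoiled': 6000},
--         'NH3': {'warning': 8, 'spoiled': 20},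
--         'H2S': {'warning': 2, 'spoiled': 5},
--         'VOCs': {'warning': 800, 'spoiled': 1600}
--     },
--     'rice': {
--         'CO2': {'warning': 1500, 'spoiled': 4000},
--         'NH3': {'warning': 10, 'spoiled': 25},
--         'H2S': {'warning': 1, 'spoiled': 3},
--         'VOCs': {'warning': 600, 'spoiled': 1200}
--     }
-- }
--
-- def determine_spoilage(food_type, gas_values):
--     status = "Fresh"
--     gas_statuses = {}
--
--     for gas, value in gas_values.items():
--         if value >= THRESHOLDS[food_type][gas]['spoiled']:
--             gas_statuses[gas] = "Above Limit"
--             status = "Spoiled"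
--         elif value >= THRESHOLDS[food_type][gas]['warning']:
--             gas_statuses[gas] = "Warning"
--             if status != "Spoiled":
--                 status = "Warning"
--         else:
--             gas_statuses[gas] = "Normal"
--
--     return status, gas_statuses
-- ===== SOURCE B (Python) =====
-- _LIMITS = {
--     ('meat', 'CO2'): (5000, 10000), ('meat', 'NH3'): (15, 30),
--     ('meat', 'H2S'): (5, 10), ('meat', 'VOCs'): (1000, 2000),
--     ('eggs', 'CO2'): (3000, 7000), ('eggs', 'NH3'): (20, 40),
--     ('eggs', 'H2S'): (3, 8), ('eggs', 'VOCs'): (800, 1500),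
--     ('dairy', 'CO2'): (4000, 8000), ('dairy', 'NH3'): (10, 25),
--     ('dairy', 'H2S'): (2, 6), ('dairy', 'VOCs'): (900, 1800),
--     ('fruits', 'CO2'): (2000, 5000), ('fruits', 'NH3'): (5, 15),
--     ('fruits', 'H2S'): (1, 4), ('fruits', 'VOCs'): (700, 1400),
--     ('vegetables', 'CO2'): (2500, 6000), ('vegetables', 'NH3'): (8, 20),
--     ('vegetables', 'H2S'): (2, 5), ('vegetables', 'VOCs'): (800, 1600),
--     ('rice', 'CO2'): (1500, 4000), ('rice', 'NH3'): (10, 25),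
--     ('rice', 'H2S'): (1, 3), ('rice', 'VOCs'): (600, 1200),
-- }
--
-- _GAS_LABEL = ("Normal", "Warning", "Above Limit")
-- _OVERALL_LABEL = ("Fresh", "Warning", "Spoiled")
--
--
-- def _level(limits, value):
--     warning, spoiled = limits
--     return 2 if value >= spoiled else 1 if value >= warning else 0
--
--
-- def determine_spoilage(food_type, gas_values):
--     levels = {gas: _level(_LIMITS[(food_type, gas)], value)
--               for gas, value in gas_values.items()}
--     overall = _OVERALL_LABEL[max(levels.values(), default=0)]
--     return overall, {gas: _GAS_LABEL[lvl] for gas, lvl in levels.items()}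
-- ===== Notes on version B (the rewrite author's own statement) =====
-- stated objective: alternative
-- what changed: Replaces A's nested threshold dict and inline mutable status-string tracking with a flat (food,gas)->limits table, a numeric severity encoding (0/1/2) per gas, a max-reduction for the overall severity, and label tables mapping severities to the status strings.
import Mathlib
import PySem

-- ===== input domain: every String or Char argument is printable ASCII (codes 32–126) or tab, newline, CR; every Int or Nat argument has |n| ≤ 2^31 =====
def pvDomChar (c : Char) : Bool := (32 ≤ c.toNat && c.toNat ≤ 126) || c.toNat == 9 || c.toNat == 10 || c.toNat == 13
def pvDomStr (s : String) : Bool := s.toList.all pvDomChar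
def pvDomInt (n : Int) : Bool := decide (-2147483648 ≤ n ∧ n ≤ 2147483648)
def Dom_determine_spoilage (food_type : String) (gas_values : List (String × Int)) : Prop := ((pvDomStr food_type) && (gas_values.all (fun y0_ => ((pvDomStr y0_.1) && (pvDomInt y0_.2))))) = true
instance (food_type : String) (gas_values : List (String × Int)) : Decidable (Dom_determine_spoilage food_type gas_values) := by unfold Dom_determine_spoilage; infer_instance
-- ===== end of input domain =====

-- B replaces A's nested threshold dict and mutable status-string tracking with a flat limits
-- table, a numeric severity encoding (0/1/2) per gas, a max-reduction, and label tables;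
-- objective: alternative.

-- ===== PORT A =====
-- A's nested THRESHOLDS dict: THRESHOLDS[food][gas] as (warning, spoiled); none = KeyError (excluded by Pre_).
def pvThr? (food gas : String) : Option (Int × Int) :=
  if food = "meat" then
    if gas = "CO2" then some (5000, 10000) else if gas = "NH3" then some (15, 30)
    else if gas = "H2S" then some (5, 10) else if gas = "VOCs" then some (1000, 2000) else none
  else if food = "eggs" then
    if gas = "CO2" then some (3000, 7000) else if gas = "NH3" then some (20, 40)
    else if gas = "H2S" then some (3, 8) else if gas = "VOCs" then some (800, 1500) else none
  else if food = "dairy" then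
    if gas = "CO2" then some (4000, 8000) else if gas = "NH3" then some (10, 25)
    else if gas = "H2S" then some (2, 6) else if gas = "VOCs" then some (900, 1800) else none
  else if food = "fruits" then
    if gas = "CO2" then some (2000, 5000) else if gas = "NH3" then some (5, 15)
    else if gas = "H2S" then some (1, 4) else if gas = "VOCs" then some (700, 1400) else none
  else if food = "vegetables" then
    if gas = "CO2" then some (2500, 6000) else if gas = "NH3" then some (8, 20)
    else if gas = "H2S" then some (2, 5) else if gas = "VOCs" then some (800, 1600) else none
  else if food = "rice" then
    if gas = "CO2" then some (1500, 4000) else if gas = "NH3" then some (10, 25)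
    else if gas = "H2S" then some (1, 3) else if gas = "VOCs" then some (600, 1200) else none
  else none

-- A's loop body: one pass mutating (status, gas_statuses); gas_statuses is a Python dict.
-- The (0,0) default is only reached where Python raises KeyError, which Pre_ excludes.
def pvStepA (food_type : String) (acc : String × PySem.Dict String String) (p : String × Int) : String × PySem.Dict String String :=
  let status := acc.1
  let gas_statuses := acc.2
  let gas := p.1
  let value := p.2
  let t := (pvThr? food_type gas).getD (0, 0)
  if value ≥ t.2 then ("Spoiled", gas_statuses.insert gas "Above Limit")
  else if value ≥ t.1 then
    (if status ≠ "Spoiled" then "Warning" else status, gas_statuses.insert gas "Warning")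
  else (status, gas_statuses.insert gas "Normal")

def determine_spoilage (food_type : String) (gas_values : List (String × Int)) : String × (List (String × String)) :=
  let res := gas_values.foldl (pvStepA food_type) ("Fresh", PySem.Dict.empty)
  (res.1, res.2.items)

-- ===== PORT B =====
-- B's flat _LIMITS table: (food, gas) ↦ (warning, spoiled); lookup failure = KeyError (excluded by Pre_).
def pvTable : List ((String × String) × (Int × Int)) :=
  [ (("meat", "CO2"), (5000, 10000)), (("meat", "NH3"), (15, 30)),
    (("meat", "H2S"), (5, 10)), (("meat", "VOCs"), (1000, 2000)),
    (("eggs", "CO2"), (3000, 7000)), (("eggs", "NH3"), (20, 40)),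
    (("eggs", "H2S"), (3, 8)), (("eggs", "VOCs"), (800, 1500)),
    (("dairy", "CO2"), (4000, 8000)), (("dairy", "NH3"), (10, 25)),
    (("dairy", "H2S"), (2, 6)), (("dairy", "VOCs"), (900, 1800)),
    (("fruits", "CO2"), (2000, 5000)), (("fruits", "NH3"), (5, 15)),
    (("fruits", "H2S"), (1, 4)), (("fruits", "VOCs"), (700, 1400)),
    (("vegetables", "CO2"), (2500, 6000)), (("vegetables", "NH3"), (8, 20)),
    (("vegetables", "H2S"), (2, 5)), (("vegetables", "VOCs"), (800, 1600)),
    (("rice", "CO2"), (1500, 4000)), (("rice", "NH3"), (10, 25)),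
    (("rice", "H2S"), (1, 3)), (("rice", "VOCs"), (600, 1200)) ]

-- the (0,0) default is only reached where Python raises KeyError, which Pre_ excludes
def pvLimits (food gas : String) : Int × Int := (pvTable.lookup (food, gas)).getD (0, 0)

-- _level: numeric severity 0/1/2 of one reading
def pvLevel (t : Int × Int) (v : Int) : Int := if v ≥ t.2 then 2 else if v ≥ t.1 then 1 else 0

-- _GAS_LABEL and _OVERALL_LABEL tuple indexing
def pvGasLabel (l : Int) : String := if l = 2 then "Above Limit" else if l = 1 then "Warning" else "Normal"
def pvOverallLabel (m : Int) : String := if m = 2 then "Spoiled" else if m = 1 then "Warning" else "Fresh"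

def determine_spoilage_alt (food_type : String) (gas_values : List (String × Int)) : String × (List (String × String)) :=
  let levels := gas_values.map (fun p => (p.1, pvLevel (pvLimits food_type p.1) p.2))
  let overall := pvOverallLabel ((levels.map (·.2)).foldl max 0)
  (overall, levels.map (fun q => (q.1, pvGasLabel q.2)))

-- ===== PRECONDITION & SPEC =====
-- Pre_ excludes inputs where Python A raises KeyError (food_type or a gas key not in THRESHOLDS),
-- and lists with duplicate gas keys, which cannot arise from A's dict argument gas_values.
def Pre_determine_spoilage (food_type : String) (gas_values : List (String × Int)) : Prop :=
  (∀ p ∈ gas_values, (pvTable.lookup (food_type, p.1)).isSome) ∧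
  (gas_values.map Prod.fst).Nodup
instance (food_type : String) (gas_values : List (String × Int)) : Decidable (Pre_determine_spoilage food_type gas_values) := by unfold Pre_determine_spoilage; infer_instance

def pvWitness_determine_spoilage : String × (List (String × Int)) :=
  ("meat", [("CO2", 6000), ("NH3", 2), ("H2S", 11)])

def Spec_determine_spoilage (food_type : String) (gas_values : List (String × Int)) (out : String × (List (String × String))) : Prop := out = determine_spoilage_alt food_type gas_values
instance (food_type : String) (gas_values : List (String × Int)) (out : String × (List (String × String))) : Decidable (Spec_determine_spoilage food_type gas_values out) := by unfold Spec_determine_spoilage; infer_instance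

-- ===== CLAIM =====
def Claim_equal_determine_spoilage : Prop := ∀ (food_type : String) (gas_values : List (String × Int)), Dom_determine_spoilage food_type gas_values → Pre_determine_spoilage food_type gas_values → Spec_determine_spoilage food_type gas_values (determine_spoilage food_type gas_values)

-- ===== LEMMAS AND PROOFS =====

-- A's nested-dict lookup agrees with B's flat table wherever the table has an entry
-- generic: a successful association-list lookup means the key is among the mapped keys
theorem pvLookup_isSome_mem (l : List ((String × String) × (Int × Int))) (a : String × String)
    (h : (l.lookup a).isSome) : a ∈ l.map Prod.fst := by
  induction l with
  | nil => simp [List.lookup] at h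
  | cons p rest ih =>
    simp only [List.lookup] at h
    cases hb : a == p.1 with
    | true =>
      simp only [List.map_cons, List.mem_cons]
      exact Or.inl (eq_of_beq hb)
    | false =>
      rw [hb] at h
      simp [ih h]

-- A's nested-dict lookup agrees with B's flat table wherever the table has an entry
theorem pvThr_agree (f g : String) (h : (pvTable.lookup (f, g)).isSome) :
    (pvThr? f g).getD (0, 0) = pvLimits f g := by
  have hm := pvLookup_isSome_mem pvTable (f, g) h
  simp only [pvTable, List.map_cons, List.map_nil, List.mem_cons, List.not_mem_nil, or_false,
    Prod.mk.injEq] at hm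
  rcases hm with ⟨rfl, rfl⟩|⟨rfl, rfl⟩|⟨rfl, rfl⟩|⟨rfl, rfl⟩|⟨rfl, rfl⟩|⟨rfl, rfl⟩|⟨rfl, rfl⟩|⟨rfl, rfl⟩|⟨rfl, rfl⟩|⟨rfl, rfl⟩|⟨rfl, rfl⟩|⟨rfl, rfl⟩|⟨rfl, rfl⟩|⟨rfl, rfl⟩|⟨rfl, rfl⟩|⟨rfl, rfl⟩|⟨rfl, rfl⟩|⟨rfl, rfl⟩|⟨rfl, rfl⟩|⟨rfl, rfl⟩|⟨rfl, rfl⟩|⟨rfl, rfl⟩|⟨rfl, rfl⟩|⟨rfl, rfl⟩ <;> decide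

-- loop invariant: A's fold from status pvOverallLabel m0 (m0 ∈ {0,1,2}) yields the label of the
-- running max severity and the dict of per-gas labels
theorem pv_loop (food_type : String) (l : List (String × Int)) (m0 : Int)
    (d : PySem.Dict String String)
    (hm : m0 = 0 ∨ m0 = 1 ∨ m0 = 2)
    (hthr : ∀ p ∈ l, (pvTable.lookup (food_type, p.1)).isSome)
    (hfresh : ∀ p ∈ l, d.contains p.1 = false)
    (hnd : (l.map Prod.fst).Nodup) :
    l.foldl (pvStepA food_type) (pvOverallLabel m0, d)
    = (pvOverallLabel ((l.map (fun p => pvLevel (pvLimits food_type p.1) p.2)).foldl max m0),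
       PySem.Dict.mk (d.items ++ l.map (fun p => (p.1, pvGasLabel (pvLevel (pvLimits food_type p.1) p.2))))) := by
  induction l generalizing m0 d with
  | nil => simp
  | cons p rest ih =>
    obtain ⟨gas, value⟩ := p
    have hc : d.contains gas = false := hfresh (gas, value) (by simp)
    have hins : ∀ v : String, (d.insert gas v).items = d.items ++ [(gas, v)] :=
      fun v => PySem.Dict.items_insert_of_not_contains d v hc
    have hfresh' : ∀ v : String, ∀ q ∈ rest, (d.insert gas v).contains q.1 = false := by
      intro v q hq
      rw [PySem.Dict.contains_insert]
      have hne : q.1 ≠ gas := by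
        simp only [List.map_cons, List.nodup_cons] at hnd
        intro h; exact hnd.1 (h ▸ List.mem_map_of_mem hq)
      simp [hne, hfresh q (by simp [hq])]
    have hnd' : (rest.map Prod.fst).Nodup := by
      simp only [List.map_cons, List.nodup_cons] at hnd; exact hnd.2
    have hthr' : ∀ q ∈ rest, (pvTable.lookup (food_type, q.1)).isSome :=
      fun q hq => hthr q (by simp [hq])
    have hthis : (pvThr? food_type gas).getD (0, 0) = pvLimits food_type gas :=
      pvThr_agree _ _ (hthr (gas, value) (by simp))
    simp only [List.foldl_cons, List.map_cons]
    set t := pvLimits food_type gas with ht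
    by_cases h1 : value ≥ t.2
    · have e : pvStepA food_type (pvOverallLabel m0, d) (gas, value)
          = ("Spoiled", d.insert gas "Above Limit") := by
        simp [pvStepA, hthis, h1]
      have elvl : pvLevel t value = 2 := by simp [pvLevel, h1]
      have e2 : ("Spoiled" : String) = pvOverallLabel (max m0 2) := by
        rcases hm with h | h | h <;> subst h <;> decide
      rw [e, e2, ih (max m0 2) _ (by rcases hm with h | h | h <;> subst h <;> decide)
        hthr' (hfresh' _) hnd', hins, elvl]
      have e3 : pvGasLabel 2 = "Above Limit" := by decide
      rw [e3, List.append_assoc]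
      rfl
    · by_cases h2 : value ≥ t.1
      · have elvl : pvLevel t value = 1 := by simp [pvLevel, h1, h2]
        have e : pvStepA food_type (pvOverallLabel m0, d) (gas, value)
            = (pvOverallLabel (max m0 1), d.insert gas "Warning") := by
          have hx : (if pvOverallLabel m0 ≠ "Spoiled" then "Warning" else pvOverallLabel m0)
              = pvOverallLabel (max m0 1) := by
            rcases hm with h | h | h <;> subst h <;> decide
          simp [pvStepA, hthis, h1, h2, hx]
        rw [e, ih (max m0 1) _ (by rcases hm with h | h | h <;> subst h <;> decide)
          hthr' (hfresh' _) hnd', hins, elvl]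
        have e3 : pvGasLabel 1 = "Warning" := by decide
        rw [e3, List.append_assoc]
        rfl
      · have elvl : pvLevel t value = 0 := by simp [pvLevel, h1, h2]
        have e : pvStepA food_type (pvOverallLabel m0, d) (gas, value)
            = (pvOverallLabel (max m0 0), d.insert gas "Normal") := by
          have : max m0 0 = m0 := by rcases hm with h | h | h <;> subst h <;> decide
          simp [pvStepA, hthis, h1, h2, this]
        rw [e, ih (max m0 0) _ (by rcases hm with h | h | h <;> subst h <;> decide)
          hthr' (hfresh' _) hnd', hins, elvl]
        have e3 : pvGasLabel 0 = "Normal" := by decide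
        rw [e3, List.append_assoc]
        rfl

-- ===== VERDICT =====
theorem determine_spoilage_spec : Claim_equal_determine_spoilage := by
  intro food_type gas_values _ hpre
  unfold Spec_determine_spoilage determine_spoilage determine_spoilage_alt
  have h0 : ("Fresh" : String) = pvOverallLabel 0 := by decide
  rw [h0, pv_loop food_type gas_values 0 PySem.Dict.empty (by decide) hpre.1 (by simp) hpre.2]
  simp only [PySem.Dict.empty, List.map_map, Prod.mk.injEq]
  exact ⟨rfl, rfl⟩
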